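-- pv_equiv track=rewrite | github.com/saif1448/STD-316 | Std316racticeProject/SampleFinalExamSolution/Task2.py | analyze_strings
-- ===== SOURCE A (Python) =====
-- from typing import List, Tuple
--
-- def analyze_strings(data: List[List[str]]) -> Tuple[List[int], List[int],
-- int]:
--     # hi cat ---> 5
--     # a tool ---> 5
--     # [5,5]
--     # [3,7]
--     #  5
--
--     """
--     Analyzes a nested list of strings and returns:
--     1. A list with the total number of characters in each row.
--     2. A list with the total number of characters in each column.
--     3. A single integer: total number of vowels (a, e, i, o, u), case
--     insensitive.
--     Requirements: - Input must be a rectangular matrix (all rows same length). - Input must be a nested list containing only strings. - Empty matrix should return ([], [], 0).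
--     >>> analyze_strings([["hi", "cat"], ["a", "tool"]])
--     ([5, 5], [3, 7], 5)
--     >>> analyze_strings([])   # empty case
--     ([], [], 0)
--     >>> analyze_strings([["abc"]])   # single element
--     ([3], [3], 1)
--     >>> analyze_strings([["bbb", "ccc"], ["ddd", "fff"]])   # no vowels
--     ([6, 6], [6, 6], 0)
--     """
--
--     # Validate type: must be list of lists
--     assert isinstance(data, list), "Input must be a list."
--     if data == []:
--         return ([], [], 0)
--     # All rows must be lists and non-empty
--     for row in data:
--         assert isinstance(row, list), "Each row must be a list."
--         assert len(row) > 0, "Rows cannot be empty."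
--
--     # Validate rectangular structure
--     col_count = len(data[0])
--     for row in data:
--         assert len(row) == col_count, "Matrix must be rectangular."
--     # Validate elements are strings
--     for row in data:
--         for item in row:
--             assert isinstance(item, str), "All elements must be strings."
--     # 1. Row character counts
--     # row_counts = [sum(len(s) for s in row) for row in data]
--     row_counts = []
--     # [hi, cat]
--     for row in data:
--         row_sum = 0
--         #  hi
--         #  cat
--         for item in row:
--             row_sum += len(item) # 2 + 3 = 5
--         row_counts.append(row_sum)
--     # 2. Column character counts
--     #  0  1
--     #0 hi cat
--     #1 a tool
--
--     # hi + a = 3 ---> 0 0 + 1 0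
--     # cat + tool = 7 ---> 0 1 + 1 1
--     column_counts = []
--     # for c in range(col_count):
--     #     col_sum = sum(len(data[r][c]) for r in range(len(data)))
--     for c in range(col_count):
--         col_sum = 0
--         for r in range(len(data)):
--             col_sum += len(data[r][c])
--         column_counts.append(col_sum)
--     # 3. Total vowels
--     vowels = set("aeiouAEIOU")
--     # vowel_count = sum(ch in vowels for row in data for cell in row for ch in
--     #                   cell)
--
--     # hi cat
--     vowel_count = 0
--     for row in data:
--         for col in row:
--             for ch in col:
--                 if ch in vowels:
--                     vowel_count += 1
--
--     return (row_counts, column_counts, vowel_count)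
-- ===== SOURCE B (Python) =====
-- from typing import List, Tuple
--
-- def analyze_strings(data: List[List[str]]) -> Tuple[List[int], List[int], int]:
--     assert isinstance(data, list), "Input must be a list."
--     if data == []:
--         return ([], [], 0)
--     for row in data:
--         assert isinstance(row, list), "Each row must be a list."
--         assert len(row) > 0, "Rows cannot be empty."
--     col_count = len(data[0])
--     for row in data:
--         assert len(row) == col_count, "Matrix must be rectangular."
--     for row in data:
--         for item in row:
--             assert isinstance(item, str), "All elements must be strings."
--     # single pass over the matrix: row totals, column totals and vowels at once
--     vowels = set("aeiouAEIOU")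
--     row_counts = []
--     column_counts = [0] * col_count
--     vowel_count = 0
--     for row in data:
--         row_total = 0
--         for c, cell in enumerate(row):
--             n = len(cell)
--             row_total += n
--             column_counts[c] += n
--             for ch in cell:
--                 if ch in vowels:
--                     vowel_count += 1
--         row_counts.append(row_total)
--     return (row_counts, column_counts, vowel_count)
-- ===== Notes on version B (the rewrite author's own statement) =====
-- stated objective: alternative
-- what changed: A's three separate computation passes (per-row sums, a column-major double index loop, a triple vowel loop) are replaced by one row-major traversal that maintains row totals, a column-accumulator array and the vowel count simultaneously; validation is unchanged.
import Mathlib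
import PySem

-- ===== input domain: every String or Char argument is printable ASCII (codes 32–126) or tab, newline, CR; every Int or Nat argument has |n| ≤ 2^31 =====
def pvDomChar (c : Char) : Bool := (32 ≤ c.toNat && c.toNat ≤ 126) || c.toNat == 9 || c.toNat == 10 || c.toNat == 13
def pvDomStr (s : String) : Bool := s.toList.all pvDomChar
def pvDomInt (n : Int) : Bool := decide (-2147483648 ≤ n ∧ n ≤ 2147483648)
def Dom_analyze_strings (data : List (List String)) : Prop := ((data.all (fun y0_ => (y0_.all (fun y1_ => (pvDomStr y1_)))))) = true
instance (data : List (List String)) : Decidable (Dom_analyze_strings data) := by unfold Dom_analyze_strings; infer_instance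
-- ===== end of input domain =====

-- B replaces A's three computation passes (row sums, column-major index loop, triple vowel loop)
-- by one row-major traversal maintaining all three accumulators; validation behaviour unchanged.

-- ===== PORT A =====
-- vowels = set("aeiouAEIOU"); the inner 'for ch in cell: if ch in vowels: count += 1' loop
def pvVowelSet : PySem.Set Char := PySem.Set.ofList "aeiouAEIOU".toList

def pvVowels (v : Int) (cell : String) : Int :=
  cell.toList.foldl (fun v ch => if ch ∈ pvVowelSet then v + 1 else v) v

-- the isinstance/non-empty/rectangular asserts always pass on inputs admitted by Pre_analyze_strings
def analyze_strings (data : List (List String)) : List Int × List Int × Int :=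
  if data = [] then ([], [], 0)
  else
    let col_count : Int := ((PySem.List.pyGetD data 0 []).length : Int)
    let row_counts : List Int :=
      data.foldl (fun rc row =>
        rc ++ [row.foldl (fun s item => s + PySem.Str.len item) 0]) []
    let column_counts : List Int :=
      (PySem.List.pyRange 0 col_count 1).foldl (fun cc c =>
        cc ++ [(PySem.List.pyRange 0 (data.length : Int) 1).foldl
          (fun s r => s + PySem.Str.len (PySem.List.pyGetD (PySem.List.pyGetD data r []) c "")) 0]) []
    let vowel_count : Int :=
      data.foldl (fun v row => row.foldl (fun v col => pvVowels v col) v) 0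
    (row_counts, column_counts, vowel_count)

-- ===== PORT B =====
-- body of 'for c, cell in enumerate(row)': running row total, column_counts[c] += len(cell), vowels
def bCellStep (st : Int × List Int × Int) (p : Int × String) : Int × List Int × Int :=
  (st.1 + PySem.Str.len p.2,
   PySem.List.pySetD st.2.1 p.1 (PySem.List.pyGetD st.2.1 p.1 0 + PySem.Str.len p.2),
   pvVowels st.2.2 p.2)

-- body of 'for row in data': fold the row's cells, append the row total
def bRowStep (st : List Int × List Int × Int) (row : List String) : List Int × List Int × Int :=
  let inner := (PySem.List.enumerate row).foldl bCellStep (0, st.2.1, st.2.2)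
  (st.1 ++ [inner.1], inner.2.1, inner.2.2)

def analyze_strings_alt (data : List (List String)) : List Int × List Int × Int :=
  if data = [] then ([], [], 0)
  else
    let col_count : Int := ((PySem.List.pyGetD data 0 []).length : Int)
    data.foldl bRowStep ([], List.replicate col_count.toNat 0, 0)

-- ===== PRECONDITION & SPEC =====
-- Pre_ excludes exactly the inputs on which A's asserts raise AssertionError:
-- a matrix with an empty row or with rows of differing lengths.
def Pre_analyze_strings (data : List (List String)) : Prop :=
  ∀ row ∈ data, row ≠ [] ∧ row.length = (data.headD []).length
instance (data : List (List String)) : Decidable (Pre_analyze_strings data) := by unfold Pre_analyze_strings; infer_instance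

def pvWitness_analyze_strings : List (List String) := [["hi", "cat"], ["a", "tool"]]

def Spec_analyze_strings (data : List (List String)) (out : List Int × List Int × Int) : Prop := out = analyze_strings_alt data
instance (data : List (List String)) (out : List Int × List Int × Int) : Decidable (Spec_analyze_strings data out) := by unfold Spec_analyze_strings; infer_instance

-- ===== CLAIM (what is proved, stated in full; the proofs are below) =====
def Claim_equal_analyze_strings : Prop := ∀ (data : List (List String)), Dom_analyze_strings data → Pre_analyze_strings data → Spec_analyze_strings data (analyze_strings data)

-- ===== LEMMAS AND PROOFS =====

-- what B's sequential 'column_counts[c] += len(cell)' updates do to the accumulator, starting at index s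
def colAddFrom (cc : List Int) (s : Int) : List String → List Int
  | [] => cc
  | x :: xs => colAddFrom (PySem.List.pySetD cc s (PySem.List.pyGetD cc s 0 + PySem.Str.len x)) (s + 1) xs

lemma bInner_eq (row : List String) : ∀ (s rt vc : Int) (cc : List Int),
    (PySem.List.enumerate row s).foldl bCellStep (rt, cc, vc)
      = (rt + (row.map PySem.Str.len).sum, colAddFrom cc s row, row.foldl pvVowels vc) := by
  induction row with
  | nil => intro s rt vc cc; simp [PySem.List.enumerate_nil, colAddFrom]
  | cons x xs ih =>
    intro s rt vc cc
    rw [PySem.List.enumerate_cons]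
    simp only [List.foldl_cons, bCellStep, colAddFrom, List.map_cons, List.sum_cons, List.foldl_cons]
    rw [ih]
    ring_nf

lemma colAddFrom_append (row : List String) : ∀ (pre suf : List Int), suf.length = row.length →
    colAddFrom (pre ++ suf) (pre.length : Int) row
      = pre ++ List.zipWith (fun a b => a + PySem.Str.len b) suf row := by
  induction row with
  | nil =>
    intro pre suf h
    have : suf = [] := List.length_eq_zero_iff.mp h
    simp [this, colAddFrom]
  | cons x xs ih =>
    intro pre suf h
    match suf with
    | y :: ys =>
      simp only [colAddFrom]
      rw [PySem.List.pyGetD_natCast, PySem.List.pySetD_natCast]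
      have hget : (pre ++ y :: ys).getD pre.length 0 = y := by
        simp [List.getD]
      have hset : ∀ v : Int, (pre ++ y :: ys).set pre.length v = (pre ++ [v]) ++ ys := by
        intro v
        rw [List.set_append_right _ _ (le_refl _)]
        simp
      rw [hget, hset]
      have hlen : ((pre ++ [y + PySem.Str.len x]).length : Int) = (pre.length : Int) + 1 := by
        simp
      rw [← hlen, ih (pre ++ [y + PySem.Str.len x]) ys (by simpa using h)]
      simp [List.zipWith]

lemma bOuter (rows : List (List String)) : ∀ (rcs cc : List Int) (vc : Int),
    rows.foldl bRowStep (rcs, cc, vc)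
      = (rcs ++ rows.map (fun row => (0 : Int) + (row.map PySem.Str.len).sum),
         rows.foldl (fun cc row => colAddFrom cc 0 row) cc,
         rows.foldl (fun vc row => row.foldl pvVowels vc) vc) := by
  induction rows with
  | nil => intro rcs cc vc; simp
  | cons row rows ih =>
    intro rcs cc vc
    simp only [List.foldl_cons, bRowStep, bInner_eq, List.map_cons]
    rw [ih]
    simp

lemma col_fold (rows : List (List String)) : ∀ (cc : List Int), (∀ row ∈ rows, row.length = cc.length) →
    rows.foldl (fun cc row => colAddFrom cc 0 row) cc
      = (List.range cc.length).map
          (fun c => cc.getD c 0 + (rows.map (fun row => PySem.Str.len (row.getD c ""))).sum) := by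
  induction rows with
  | nil =>
    intro cc _
    apply List.ext_getElem (by simp)
    intro i h1 h2
    simp at h2 ⊢
    simp [List.getElem?_eq_getElem h2]
  | cons row rows ih =>
    intro cc h
    have hr : row.length = cc.length := h row (by simp)
    simp only [List.foldl_cons]
    have hz : colAddFrom cc 0 row = List.zipWith (fun a b => a + PySem.Str.len b) cc row := by
      have := colAddFrom_append row [] cc hr.symm
      simpa using this
    rw [hz]
    have hlz : (List.zipWith (fun a b => a + PySem.Str.len b) cc row).length = cc.length := by
      simp [hr]
    rw [ih _ (by intro r hrm; rw [hlz]; exact h r (by simp [hrm])), hlz]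
    apply List.map_congr_left
    intro c hc
    have hclt : c < cc.length := List.mem_range.mp hc
    have hcr : c < row.length := by omega
    rw [List.getD_eq_getElem _ _ (by simpa [hr] using hclt),
        List.getD_eq_getElem _ _ hclt, List.getElem_zipWith]
    simp only [List.map_cons, List.sum_cons]
    rw [List.getD_eq_getElem _ _ hcr]
    ring

lemma inner_col (data : List (List String)) (c : Int) :
    (PySem.List.pyRange 0 (data.length : Int) 1).foldl
        (fun s r => s + PySem.Str.len (PySem.List.pyGetD (PySem.List.pyGetD data r []) c "")) 0
      = 0 + (data.map (fun row => PySem.Str.len (PySem.List.pyGetD row c ""))).sum := by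
  rw [PySem.List.foldl_pyRange_zero_pyGetD' data []
        (fun s row => s + PySem.Str.len (PySem.List.pyGetD row c "")) 0,
      PySem.List.foldl_add]

-- ===== VERDICT (by name: the statement is the Claim_ definition above) =====
theorem analyze_strings_spec : Claim_equal_analyze_strings := by
  intro data _ hpre
  unfold Spec_analyze_strings
  by_cases hd : data = []
  · simp [analyze_strings, analyze_strings_alt, hd]
  · simp only [analyze_strings, analyze_strings_alt, if_neg hd]
    rw [bOuter, PySem.List.foldl_append_singleton_eq_map, PySem.List.foldl_append_singleton_eq_map]
    simp only [inner_col]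
    rw [PySem.List.pyRange_zero_nat]
    have hk : ∀ row ∈ data, row.length = (PySem.List.pyGetD data 0 []).length := by
      intro row hm
      rw [PySem.List.pyGetD_zero]
      have := (hpre row hm).2
      cases data with
      | nil => exact absurd rfl hd
      | cons a l => simpa using this
    rw [col_fold data _ (by simpa using hk)]
    simp only [Prod.mk.injEq, List.nil_append, List.length_replicate, Int.toNat_natCast, List.map_map]
    refine ⟨?_, ?_, trivial⟩
    · apply List.map_congr_left
      intro row _
      rw [PySem.List.foldl_add]
    · simp only [Function.comp_def]
      apply List.map_congr_left
      intro c hc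
      have hcn := List.mem_range.mp hc
      simp [List.getD, hcn]
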